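-- pv_equiv track=rewrite | github.com/minerdev2020/codingTest | 30.py | solution
-- ===== SOURCE A (Python) =====
-- def solution(n, m, height):
--     result = 0
--     left = 0
--     right = 0
--     check = False
--     for i in height:
--         if right < i:
--             right = i
--     while left <= right:
--         mid= (left + right)//2
--         tmp_m = 0
--         for i in height:
--             if (i - mid) > 0:
--                 tmp_m += (i - mid)
--         if tmp_m >= m:
--             left = mid + 1
--             result = mid
--         else:
--             right = mid - 1
--
--     return result
-- ===== SOURCE B (Python) =====
-- def solution(n, m, height):
--     top = 0
--     for i in height:
--         if i > top:
--             top = i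
--     if m <= 0:
--         return top
--     best = 0
--     prefix = 0
--     for k, h in enumerate(sorted(height, reverse=True), 1):
--         prefix += h
--         cand = min(top, (prefix - m) // k)
--         if cand > best:
--             best = cand
--     return best
-- ===== Notes on version B (the rewrite author's own statement) =====
-- stated objective: alternative
-- what changed: Replaces the binary search over cut heights (recomputing the removed wood by a full scan at each probe) with a sort + prefix-sum scan: the answer is the maximum over k of min(maxH, (P_k - m) // k), where P_k is the sum of the k tallest trees.
import Mathlib
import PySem

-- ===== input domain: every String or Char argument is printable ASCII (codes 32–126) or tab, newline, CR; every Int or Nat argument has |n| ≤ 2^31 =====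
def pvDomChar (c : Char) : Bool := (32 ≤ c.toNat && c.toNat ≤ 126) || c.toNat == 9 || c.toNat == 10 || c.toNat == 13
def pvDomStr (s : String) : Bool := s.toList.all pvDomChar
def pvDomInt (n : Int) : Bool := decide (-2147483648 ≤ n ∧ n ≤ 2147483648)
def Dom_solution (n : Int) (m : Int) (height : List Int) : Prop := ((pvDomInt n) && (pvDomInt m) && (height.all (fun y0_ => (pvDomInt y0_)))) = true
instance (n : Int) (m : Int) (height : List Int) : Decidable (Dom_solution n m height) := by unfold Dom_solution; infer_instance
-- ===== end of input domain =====

-- B replaces A's binary search over cut heights with a sort + prefix-sum scan over tree counts;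
-- same return value everywhere, similar cost (alternative algorithm, no speed claim).

-- ===== PORT A =====
-- the inner 'for i in height: if (i - mid) > 0: tmp_m += (i - mid)' loop
def solutionInner (l : List Int) (mid : Int) : Int :=
  l.foldl (fun tmp i => if 0 < i - mid then tmp + (i - mid) else tmp) 0

-- small named termination facts for the while-loop (cited by name to keep the port's term small)
theorem solutionLoop_dec1 (left right : Int) (hlr : left ≤ right) :
    (right + 1 - (PySem.Int.floordiv (left + right) 2 + 1)).toNat < (right + 1 - left).toNat := by
  have hb := PySem.Int.floordiv_two_mid_bounds hlr
  omega

theorem solutionLoop_dec2 (left right : Int) (hlr : left ≤ right) :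
    (PySem.Int.floordiv (left + right) 2 - 1 + 1 - left).toNat < (right + 1 - left).toNat := by
  have hb := PySem.Int.floordiv_two_mid_bounds hlr
  omega

-- the 'while left <= right' loop, recursion on the shrinking interval
def solutionLoop (m : Int) (l : List Int) (result left right : Int) : Int :=
  if hlr : left ≤ right then
    let mid := PySem.Int.floordiv (left + right) 2
    if m ≤ solutionInner l mid then
      solutionLoop m l mid (mid + 1) right
    else
      solutionLoop m l result left (mid - 1)
  else result
termination_by (right + 1 - left).toNat
decreasing_by
  · exact solutionLoop_dec1 left right hlr
  · exact solutionLoop_dec2 left right hlr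

def solution (n : Int) (m : Int) (height : List Int) : Int :=
  let right := height.foldl (fun r i => if r < i then i else r) 0
  solutionLoop m height 0 0 right

-- ===== PORT B =====
def solution_alt (n : Int) (m : Int) (height : List Int) : Int :=
  let top := height.foldl (fun t i => if t < i then i else t) 0
  if m ≤ 0 then top
  else
    ((PySem.List.enumerate (PySem.List.sorted height (fun x => x) true) 1).foldl
      (fun (st : Int × Int) kh =>
        let pfx := st.2 + kh.2
        let cand := min top (PySem.Int.floordiv (pfx - m) kh.1)
        ((if st.1 < cand then cand else st.1), pfx)) (0, 0)).1

-- ===== PRECONDITION & SPEC =====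
def Spec_solution (n : Int) (m : Int) (height : List Int) (out : Int) : Prop := out = solution_alt n m height
instance (n : Int) (m : Int) (height : List Int) (out : Int) : Decidable (Spec_solution n m height out) := by unfold Spec_solution; infer_instance

-- ===== CLAIM (what is proved, stated in full; the proofs are below) =====
def Claim_equal_solution : Prop := ∀ (n : Int) (m : Int) (height : List Int), Dom_solution n m height → Spec_solution n m height (solution n m height)

-- ===== LEMMAS AND PROOFS =====

-- removed wood at cut height h
def wood (l : List Int) (h : Int) : Int := (l.map (fun i => max (i - h) 0)).sum

theorem wood_cons (a : Int) (t : List Int) (h : Int) :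
    wood (a :: t) h = max (a - h) 0 + wood t h := by simp [wood]

theorem solutionInner_eq (l : List Int) (mid : Int) : solutionInner l mid = wood l mid := by
  suffices H : ∀ acc : Int, l.foldl (fun tmp i => if 0 < i - mid then tmp + (i - mid) else tmp) acc
      = acc + wood l mid by
    simpa [solutionInner] using H 0
  induction l with
  | nil => intro acc; simp [wood]
  | cons a t ih =>
    intro acc
    rw [List.foldl_cons, wood_cons, ih]
    split <;> omega

theorem wood_nonneg (l : List Int) (h : Int) : 0 ≤ wood l h := by
  induction l with
  | nil => simp [wood]
  | cons a t ih => rw [wood_cons]; omega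

theorem wood_anti (l : List Int) {h h' : Int} (hh : h ≤ h') : wood l h' ≤ wood l h := by
  induction l with
  | nil => simp [wood]
  | cons a t ih => rw [wood_cons, wood_cons]; omega

theorem wood_perm {l l' : List Int} (hp : l.Perm l') (h : Int) : wood l h = wood l' h := by
  unfold wood
  exact (hp.map _).sum_eq

theorem wood_append (a b : List Int) (h : Int) : wood (a ++ b) h = wood a h + wood b h := by
  simp [wood]

theorem wood_ge (l : List Int) (h : Int) : l.sum - (l.length : Int) * h ≤ wood l h := by
  induction l with
  | nil => simp [wood]
  | cons a t ih =>
    rw [wood_cons, List.sum_cons]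
    have : ((a :: t).length : Int) * h = (t.length : Int) * h + h := by
      push_cast [List.length_cons]; ring
    rw [this]
    omega

theorem wood_eq_zero (l : List Int) (h : Int) (hall : ∀ i ∈ l, i ≤ h) : wood l h = 0 := by
  induction l with
  | nil => simp [wood]
  | cons a t ih =>
    rw [wood_cons, ih (fun i hi => hall i (List.mem_cons_of_mem a hi))]
    have := hall a (List.mem_cons_self ..)
    omega

-- any prefix gives a lower bound on the wood
theorem take_sum_le (l : List Int) (k : Nat) (hk : k ≤ l.length) (h : Int) :
    (l.take k).sum - (k : Int) * h ≤ wood l h := by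
  have h1 : wood l h = wood (l.take k) h + wood (l.drop k) h := by
    rw [← wood_append, List.take_append_drop]
  have h2 := wood_ge (l.take k) h
  rw [List.length_take, Nat.min_eq_left hk] at h2
  have h3 := wood_nonneg (l.drop k) h
  omega

-- on a descending list, the wood is exactly the prefix of trees taller than h
theorem wood_eq_prefix (l : List Int) (hp : l.Pairwise (fun a b => b ≤ a)) (h : Int) :
    wood l h = (l.take (l.countP (fun i => decide (h < i)))).sum
               - (l.countP (fun i => decide (h < i)) : Int) * h := by
  induction l with
  | nil => simp [wood]
  | cons a t ih =>
    rw [List.pairwise_cons] at hp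
    obtain ⟨ha, hpt⟩ := hp
    by_cases hha : h < a
    · rw [wood_cons, ih hpt]
      have hc : (a :: t).countP (fun i => decide (h < i)) = t.countP (fun i => decide (h < i)) + 1 := by
        rw [List.countP_cons]; simp [hha]
      rw [hc]
      rw [List.take_succ_cons, List.sum_cons]
      have : ((t.countP (fun i => decide (h < i)) + 1 : Nat) : Int) * h
           = (t.countP (fun i => decide (h < i)) : Int) * h + h := by push_cast; ring
      rw [this]
      omega
    · have hct : t.countP (fun i => decide (h < i)) = 0 := by
        rw [List.countP_eq_zero]
        intro b hb
        simp only [decide_eq_true_eq]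
        have := ha b hb
        omega
      have hc : (a :: t).countP (fun i => decide (h < i)) = 0 := by
        rw [List.countP_cons, hct]; simp [hha]
      rw [hc]
      have hz : wood (a :: t) h = 0 := by
        apply wood_eq_zero
        intro i hi
        rcases List.mem_cons.1 hi with rfl | hi
        · omega
        · have := ha i hi; omega
      rw [hz]
      simp

-- the max-fold computing 'right'/'top'
theorem foldl_max_spec (l : List Int) :
    0 ≤ l.foldl (fun r i => if r < i then i else r) 0 ∧
    ∀ i ∈ l, i ≤ l.foldl (fun r i => if r < i then i else r) 0 := by
  suffices H : ∀ acc : Int, acc ≤ l.foldl (fun r i => if r < i then i else r) acc ∧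
      ∀ i ∈ l, i ≤ l.foldl (fun r i => if r < i then i else r) acc from H 0
  induction l with
  | nil => intro acc; simp
  | cons a t ih =>
    intro acc
    rw [List.foldl_cons]
    obtain ⟨ih1, ih2⟩ := ih (if acc < a then a else acc)
    have hle : acc ≤ (if acc < a then a else acc) := by split <;> omega
    have hae : a ≤ (if acc < a then a else acc) := by split <;> omega
    refine ⟨le_trans hle ih1, ?_⟩
    intro i hi
    rcases List.mem_cons.1 hi with rfl | hi
    · exact le_trans hae ih1
    · exact ih2 i hi

-- binary-search loop characterization
theorem loop_spec (m : Int) (l : List Int) (result left right : Int) :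
    ((∃ h, left ≤ h ∧ h ≤ right ∧ m ≤ wood l h) →
      (m ≤ wood l (solutionLoop m l result left right) ∧
       left ≤ solutionLoop m l result left right ∧
       solutionLoop m l result left right ≤ right ∧
       ∀ h, h ≤ right → m ≤ wood l h → h ≤ solutionLoop m l result left right)) ∧
    ((∀ h, left ≤ h → h ≤ right → ¬ m ≤ wood l h) → solutionLoop m l result left right = result) := by
  fun_induction solutionLoop m l result left right with
  | case1 result left right hlr mid htmp ih =>
    obtain ⟨hml, hmr⟩ := PySem.Int.floordiv_two_mid_bounds hlr
    have hfm : m ≤ wood l mid := by rwa [solutionInner_eq] at htmp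
    by_cases hex : ∃ h, mid + 1 ≤ h ∧ h ≤ right ∧ m ≤ wood l h
    · obtain ⟨h1, h2, h3, h4⟩ := ih.1 hex
      constructor
      · intro _
        exact ⟨h1, by omega, h3, fun h hhr hf => h4 h hhr hf⟩
      · intro hall
        exact absurd hfm (hall mid (by omega) (by omega))
    · have heq : solutionLoop m l mid (mid + 1) right = mid :=
        ih.2 (fun h hl hr hf => absurd ⟨h, hl, hr, hf⟩ hex)
      constructor
      · intro _
        rw [heq]
        refine ⟨hfm, by omega, by omega, fun h hhr hf => ?_⟩
        by_contra hc
        exact hex ⟨h, by omega, hhr, hf⟩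
      · intro hall
        exact absurd hfm (hall mid (by omega) (by omega))
  | case2 result left right hlr mid htmp ih =>
    obtain ⟨hml, hmr⟩ := PySem.Int.floordiv_two_mid_bounds hlr
    rw [solutionInner_eq] at htmp
    have hub : ∀ h, m ≤ wood l h → h ≤ mid - 1 := by
      intro h hf
      by_contra hc
      have := wood_anti l (show mid ≤ h by omega)
      omega
    constructor
    · rintro ⟨h, hl, hr, hf⟩
      obtain ⟨h1, h2, h3, h4⟩ := ih.1 ⟨h, hl, hub h hf, hf⟩
      exact ⟨h1, h2, by omega, fun h' hr' hf' => h4 h' (hub h' hf') hf'⟩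
    · intro hall
      exact ih.2 (fun h hl hr hf => hall h hl (by omega) hf)
  | case3 result left right hlr =>
    constructor
    · rintro ⟨h, hl, hr, _⟩
      omega
    · intro _
      rfl

-- B's fold characterization (generalized over start index and accumulator)
theorem bfold_spec (top m : Int) (l : List Int) (s b p : Int) :
    let out := (PySem.List.enumerate l s).foldl
      (fun (st : Int × Int) kh =>
        let pfx := st.2 + kh.2
        let cand := min top (PySem.Int.floordiv (pfx - m) kh.1)
        ((if st.1 < cand then cand else st.1), pfx)) (b, p)
    b ≤ out.1 ∧
    (∀ j : Nat, j < l.length →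
       min top (PySem.Int.floordiv (p + (l.take (j+1)).sum - m) (s + j)) ≤ out.1) ∧
    (out.1 = b ∨ ∃ j : Nat, j < l.length ∧
       out.1 = min top (PySem.Int.floordiv (p + (l.take (j+1)).sum - m) (s + j))) := by
  induction l generalizing s b p with
  | nil =>
    simp [PySem.List.enumerate_nil]
  | cons x t ih =>
    rw [PySem.List.enumerate_cons, List.foldl_cons]
    obtain ⟨ih1, ih2, ih3⟩ := ih (s + 1)
      (if b < min top (PySem.Int.floordiv (p + x - m) s) then min top (PySem.Int.floordiv (p + x - m) s) else b)
      (p + x)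
    refine ⟨?_, ?_, ?_⟩
    · refine le_trans ?_ ih1
      split <;> omega
    · intro j hj
      match j with
      | 0 =>
        simp only [List.take_succ_cons, List.take_zero, List.sum_cons, List.sum_nil]
        refine le_trans ?_ ih1
        have : p + (x + 0) - m = p + x - m := by ring
        rw [this]
        simp only [Nat.cast_zero, add_zero]
        split <;> omega
      | Nat.succ j' =>
        have hj' : j' < t.length := by simpa using hj
        have := ih2 j' hj'
        simp only [List.take_succ_cons, List.sum_cons] at *
        have harith : p + (x + (t.take (j' + 1)).sum) - m = p + x + (t.take (j' + 1)).sum - m := by ring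
        have hidx : s + ((j' + 1 : Nat) : Int) = s + 1 + (j' : Int) := by push_cast; ring
        rw [harith, hidx]
        exact this
    · rcases ih3 with h | ⟨j, hj, hout⟩
      · by_cases hc : b < min top (PySem.Int.floordiv (p + x - m) s)
        · right
          refine ⟨0, by simp, ?_⟩
          rw [h]
          simp only [List.take_succ_cons, List.take_zero, List.sum_cons, List.sum_nil,
            Nat.cast_zero, add_zero, if_pos hc]
        · left
          rw [h, if_neg hc]
      · right
        refine ⟨j + 1, by simpa using hj, ?_⟩
        rw [hout]
        simp only [List.take_succ_cons, List.sum_cons]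
        have harith : p + x + (t.take (j + 1)).sum - m = p + (x + (t.take (j + 1)).sum) - m := by ring
        have hidx : s + 1 + (j : Int) = s + ((j + 1 : Nat) : Int) := by push_cast; ring
        rw [harith, hidx]

-- ===== VERDICT (by name: the statement is the Claim_ definition above) =====
theorem solution_spec : Claim_equal_solution := by
  intro n m height _hd
  unfold Spec_solution
  show solution n m height = solution_alt n m height
  unfold solution solution_alt
  obtain ⟨hR0, hRub⟩ := foldl_max_spec height
  set R := height.foldl (fun r i => if r < i then i else r) 0 with hRdef
  by_cases hm : m ≤ 0
  · rw [if_pos hm]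
    obtain ⟨hfeas, h0, hle, hmax⟩ := (loop_spec m height 0 0 R).1
      ⟨R, hR0, le_refl R, le_trans hm (wood_nonneg height R)⟩
    exact le_antisymm hle (hmax R le_rfl (le_trans hm (wood_nonneg height R)))
  · rw [if_neg hm]
    rw [not_le] at hm
    set hs := PySem.List.sorted height (fun x => x) true with hhs
    have hperm : hs.Perm height := PySem.List.sorted_perm height (fun x => x) true
    have hpair : hs.Pairwise (fun a b => b ≤ a) := by
      have := PySem.List.sorted_pairwise_rev height (fun x => x)
      simpa using this
    obtain ⟨hb0, hble, hbcases⟩ := bfold_spec R m hs 1 0 0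
    have candFeas : ∀ j : Nat, j < hs.length →
        ∀ c : Int, c = min R (PySem.Int.floordiv (0 + (hs.take (j+1)).sum - m) (1 + (j:Int))) →
        0 ≤ c → m ≤ wood height c ∧ c ≤ R := by
      intro j hj c hc h0c
      have hcR : c ≤ R := hc ▸ min_le_left _ _
      have hcf : c ≤ PySem.Int.floordiv (0 + (hs.take (j+1)).sum - m) (1 + (j:Int)) :=
        hc ▸ min_le_right _ _
      have hpos : (0:Int) < 1 + (j:Int) := by positivity
      rw [PySem.Int.le_floordiv_iff_mul_le hpos] at hcf
      have hts := take_sum_le hs (j+1) (by omega) c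
      have hw : wood hs c = wood height c := wood_perm hperm c
      have hcast : ((j+1 : Nat) : Int) = 1 + (j:Int) := by push_cast; ring
      rw [hcast] at hts
      have hmc := mul_comm c ((1:Int) + (j:Int))
      constructor
      · linarith
      · exact hcR
    have feasCand : ∀ h : Int, 0 ≤ h → h ≤ R → m ≤ wood height h →
        ∃ j : Nat, j < hs.length ∧
          h ≤ min R (PySem.Int.floordiv (0 + (hs.take (j+1)).sum - m) (1 + (j:Int))) := by
      intro h h0 hhR hf
      have hw : wood hs h = wood height h := wood_perm hperm h
      have hpre := wood_eq_prefix hs hpair h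
      set k := hs.countP (fun i => decide (h < i)) with hk
      have hklen : k ≤ hs.length := hs.countP_le_length
      have hk1 : 1 ≤ k := by
        by_contra hc
        have hk0 : k = 0 := by omega
        rw [hk0] at hpre
        simp at hpre
        omega
      refine ⟨k - 1, by omega, ?_⟩
      have hsub : k - 1 + 1 = k := by omega
      rw [hsub]
      refine le_min hhR ?_
      have hpos : (0:Int) < 1 + ((k-1 : Nat):Int) := by positivity
      rw [PySem.Int.le_floordiv_iff_mul_le hpos]
      have hcast : (1 : Int) + ((k-1:Nat):Int) = (k:Int) := by omega
      rw [hcast]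
      have hmk : m ≤ (hs.take k).sum - (k:Int) * h := by linarith
      have hmc := mul_comm h ((k:Int))
      linarith
    by_cases hE : ∃ h : Int, 0 ≤ h ∧ h ≤ R ∧ m ≤ wood height h
    · obtain ⟨hfo, h0o, hoR, hmaxo⟩ := (loop_spec m height 0 0 R).1 hE
      apply le_antisymm
      · obtain ⟨j, hj, hle⟩ := feasCand _ h0o hoR hfo
        exact le_trans hle (hble j hj)
      · rcases hbcases with hb | ⟨j, hj, he⟩
        · rw [hb]; exact h0o
        · have h0c : (0:Int) ≤ _ := hb0
          obtain ⟨hfc, hcR⟩ := candFeas j hj _ he (by omega)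
          exact hmaxo _ hcR hfc
    · have hz := (loop_spec m height 0 0 R).2 (fun h hl hr hf => hE ⟨h, hl, hr, hf⟩)
      rw [hz]
      rcases hbcases with hb | ⟨j, hj, he⟩
      · exact hb.symm
      · exfalso
        obtain ⟨hfc, hcR⟩ := candFeas j hj _ he (by omega)
        exact hE ⟨_, by omega, hcR, hfc⟩
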